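-- pv_equiv track=rewrite | github.com/Stougaardian/Discordbot-to-Obsidian | vault_tools.py | _find_heading
-- ===== SOURCE A (Python) =====
-- from typing import List
--
-- def _find_heading(lines: List[str], index: int) -> str:
--     if not lines:
--         return "(top)"
--     if index >= len(lines):
--         index = len(lines) - 1
--     if index < 0:
--         return "(top)"
--     for i in range(index, -1, -1):
--         line = lines[i].strip()
--         if line.startswith("#"):
--             return line.lstrip("#").strip() or "(top)"
--     return "(top)"
-- ===== SOURCE B (Python) =====
-- from typing import List
--
-- def _find_heading(lines: List[str], index: int) -> str:
--     # Forward scan keeping the most recent heading line seen up to `index`.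
--     if not lines:
--         return "(top)"
--     if index >= len(lines):
--         index = len(lines) - 1
--     if index < 0:
--         return "(top)"
--     last = None
--     for i in range(0, index + 1):
--         s = lines[i].strip()
--         if s.startswith("#"):
--             last = s
--     if last is None:
--         return "(top)"
--     return last.lstrip("#").strip() or "(top)"
-- ===== Notes on version B (the rewrite author's own statement) =====
-- stated objective: alternative
-- what changed: Replaces A's backward early-return scan from index down to 0 with a forward fold over lines[0..index] that maintains the last heading line seen, returning it after the loop.
import Mathlib
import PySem

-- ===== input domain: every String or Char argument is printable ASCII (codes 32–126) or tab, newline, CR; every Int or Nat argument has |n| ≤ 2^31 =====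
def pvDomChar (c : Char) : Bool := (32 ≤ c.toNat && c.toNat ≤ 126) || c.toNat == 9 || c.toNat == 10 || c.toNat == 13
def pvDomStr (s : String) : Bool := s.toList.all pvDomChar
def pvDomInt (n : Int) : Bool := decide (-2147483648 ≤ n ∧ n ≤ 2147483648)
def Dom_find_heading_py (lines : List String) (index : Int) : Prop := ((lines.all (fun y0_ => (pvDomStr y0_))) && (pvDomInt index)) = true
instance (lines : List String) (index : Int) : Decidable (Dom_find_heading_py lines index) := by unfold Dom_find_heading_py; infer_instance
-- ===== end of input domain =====

-- B replaces A's backward early-return scan with a forward fold keeping the last heading seen (alternative decomposition, same cost).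


-- exact port of Python s.lstrip("#"): drop the leading run of '#' characters (shared helper of both ports)
def lstripHash (s : String) : String := String.ofList (s.toList.dropWhile (· == '#'))

-- ===== PORT A =====
-- A's loop: first i (scanning from index down to 0) whose stripped line starts with "#", early return
def findA_loop (lines : List String) : List Int → String
  | [] => "(top)"
  | i :: rest =>
      let line := PySem.Str.strip (PySem.List.pyGetD lines i "")
      if PySem.Str.startswith line "#" then
        let r := PySem.Str.strip (lstripHash line)
        if r = "" then "(top)" else r
      else findA_loop lines rest

def find_heading_py (lines : List String) (index : Int) : String :=
  if lines = [] then "(top)"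
  else
    let index := if index ≥ PySem.List.len lines then PySem.List.len lines - 1 else index
    if index < 0 then "(top)"
    else findA_loop lines (PySem.List.pyRange index (-1) (-1))

-- ===== PORT B =====
def find_heading_py_alt (lines : List String) (index : Int) : String :=
  if lines = [] then "(top)"
  else
    let index := if index ≥ PySem.List.len lines then PySem.List.len lines - 1 else index
    if index < 0 then "(top)"
    else
      let last := (PySem.List.pyRange 0 (index + 1) 1).foldl
        (fun acc i =>
          let s := PySem.Str.strip (PySem.List.pyGetD lines i "")
          if PySem.Str.startswith s "#" then some s else acc) none
      match last with
      | none => "(top)"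
      | some s =>
          let r := PySem.Str.strip (lstripHash s)
          if r = "" then "(top)" else r

-- ===== PRECONDITION & SPEC =====
def Spec_find_heading_py (lines : List String) (index : Int) (out : String) : Prop := out = find_heading_py_alt lines index
instance (lines : List String) (index : Int) (out : String) : Decidable (Spec_find_heading_py lines index out) := by unfold Spec_find_heading_py; infer_instance

-- ===== CLAIM (what is proved, stated in full; the proofs are below) =====
def Claim_equal_find_heading_py : Prop := ∀ (lines : List String) (index : Int), Dom_find_heading_py lines index → Spec_find_heading_py lines index (find_heading_py lines index)

-- ===== LEMMAS AND PROOFS =====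

-- predicate "stripped line at index i is a heading"
def isHead (lines : List String) (i : Int) : Bool :=
  PySem.Str.startswith (PySem.Str.strip (PySem.List.pyGetD lines i "")) "#"

-- the value returned once a heading line (already stripped) is found
def headOut (lines : List String) : Option Int → String
  | none => "(top)"
  | some i =>
      let r := PySem.Str.strip (lstripHash (PySem.Str.strip (PySem.List.pyGetD lines i "")))
      if r = "" then "(top)" else r

-- A's early-return loop is the first match of the visited index list
theorem findA_loop_eq_find (lines : List String) (l : List Int) :
    findA_loop lines l = headOut lines (l.find? (isHead lines)) := by
  induction l with
  | nil => rfl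
  | cons i rest ih =>
      rw [List.find?_cons]
      by_cases h : isHead lines i = true
      · have h' : PySem.Str.startswith (PySem.Str.strip (PySem.List.pyGetD lines i "")) "#" = true := h
        simp only [findA_loop, h', if_true, h, headOut]
      · rw [Bool.not_eq_true] at h
        have h' : PySem.Str.startswith (PySem.Str.strip (PySem.List.pyGetD lines i "")) "#" = false := h
        simp only [findA_loop, h', Bool.false_eq_true, if_false, h, ih]

-- B's fold keeps the LAST match = first match of the reversed index list
theorem foldl_last_match (lines : List String) (l : List Int) (a : Option String) :
    l.foldl (fun acc i =>
        let s := PySem.Str.strip (PySem.List.pyGetD lines i "")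
        if PySem.Str.startswith s "#" then some s else acc) a
      = match l.reverse.find? (isHead lines) with
        | some i => some (PySem.Str.strip (PySem.List.pyGetD lines i ""))
        | none => a := by
  induction l generalizing a with
  | nil => rfl
  | cons i rest ih =>
      simp only [List.foldl_cons, List.reverse_cons, List.find?_append, ih]
      cases hf : rest.reverse.find? (isHead lines) with
      | some j => simp
      | none =>
          simp only [List.find?_cons, List.find?_nil, Option.none_or]
          by_cases h : isHead lines i = true
          · have h' : PySem.Str.startswith (PySem.Str.strip (PySem.List.pyGetD lines i "")) "#" = true := h
            simp only [h, h', if_true]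
          · rw [Bool.not_eq_true] at h
            have h' : PySem.Str.startswith (PySem.Str.strip (PySem.List.pyGetD lines i "")) "#" = false := h
            simp only [h, h', Bool.false_eq_true, if_false]

-- ===== VERDICT (by name: the statement is the Claim_ definition above) =====
theorem find_heading_py_spec : Claim_equal_find_heading_py := by
  intro lines index _
  unfold Spec_find_heading_py find_heading_py find_heading_py_alt
  by_cases hnil : lines = []
  · simp [hnil]
  · simp only [hnil, if_false]
    set idx := if index ≥ PySem.List.len lines then PySem.List.len lines - 1 else index with hidx
    by_cases hneg : idx < 0
    · simp [hneg]
    · simp only [hneg, if_false]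
      rw [PySem.List.pyRange_neg_one_eq_reverse, findA_loop_eq_find, foldl_last_match]
      norm_num
      cases hf : ((PySem.List.pyRange 0 (idx + 1)).reverse).find? (isHead lines) with
      | none => simp only [headOut]
      | some i => simp only [headOut]
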